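-- pv_equiv track=rewrite | github.com/edt-yxz-zzd/python3_src | nn_ns/gui/layout/layout_old.py | scaleOneSizesOffsets
-- ===== SOURCE A (Python) =====
-- from itertools import accumulate, product, islice
--
-- def scaleOneSize(minlength, total_minlength, total_outlength):
--     assert 0 <= minlength <= total_minlength <= total_outlength
--     if total_minlength == 0:
--         return 0
--     return total_outlength*minlength//total_minlength
--
-- def scaleOneSizesOffsets(minlengths, total_minlength, total_outlength):
--     ls = [0]
--     for minlength in minlengths:
--         s = scaleOneSize(minlength, total_minlength, total_outlength)
--         ls.append(s)
--     offsets = list(accumulate(ls))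
--     endpad = total_outlength - offsets[-1]
--     assert endpad >= 0
--
--     ls[-1] += endpad
--     sizes = ls[1:]
--     offsets = offsets[:-1]
--     assert len(sizes) == len(offsets)
--     return sizes, offsets
-- ===== SOURCE B (Python) =====
-- def scaleOneSize(minlength, total_minlength, total_outlength):
--     assert 0 <= minlength <= total_minlength <= total_outlength
--     if total_minlength == 0:
--         return 0
--     return total_outlength*minlength//total_minlength
--
-- def scaleOneSizesOffsets(minlengths, total_minlength, total_outlength):
--     # Scale every entry, then let the LAST size directly fill all remaining
--     # space (no endpad variable), and derive the offsets BACK-TO-FRONT by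
--     # subtracting sizes from total_outlength.
--     sizes = [scaleOneSize(m, total_minlength, total_outlength) for m in minlengths]
--     assert sum(sizes) <= total_outlength
--     if sizes:
--         sizes[-1] = total_outlength - sum(sizes[:-1])
--     offsets = []
--     running = total_outlength
--     for s in reversed(sizes):
--         running -= s
--         offsets.append(running)
--     offsets.reverse()
--     return sizes, offsets
-- ===== Notes on version B (the rewrite author's own statement) =====
-- stated objective: alternative
-- what changed: Instead of accumulating prefix sums forward and adding an endpad to the last size, B sets the last size directly to the remaining space and builds the offsets back-to-front by subtracting sizes from total_outlength.
import Mathlib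
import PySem

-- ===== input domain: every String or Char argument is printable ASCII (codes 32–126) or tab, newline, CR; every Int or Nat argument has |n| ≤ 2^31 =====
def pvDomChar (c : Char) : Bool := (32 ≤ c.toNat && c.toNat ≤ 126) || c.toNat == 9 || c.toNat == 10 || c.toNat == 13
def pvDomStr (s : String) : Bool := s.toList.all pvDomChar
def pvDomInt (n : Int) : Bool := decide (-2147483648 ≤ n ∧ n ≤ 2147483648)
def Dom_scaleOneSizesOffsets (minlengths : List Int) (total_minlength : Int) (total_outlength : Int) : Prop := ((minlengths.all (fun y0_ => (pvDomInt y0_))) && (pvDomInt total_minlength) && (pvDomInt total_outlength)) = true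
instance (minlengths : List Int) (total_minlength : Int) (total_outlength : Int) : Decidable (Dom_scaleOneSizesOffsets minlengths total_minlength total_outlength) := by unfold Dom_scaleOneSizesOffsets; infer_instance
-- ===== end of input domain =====

-- B drops the forward prefix-sum/endpad scheme: it sets the last size directly to the
-- remaining space and derives the offsets back-to-front from total_outlength (objective: alternative).

-- ===== PORT A =====
-- asserts in scaleOneSize and the endpad assert raise AssertionError; those inputs are excluded by Pre_
def scaleOneSize (minlength total_minlength total_outlength : Int) : Int :=
  if total_minlength = 0 then 0
  else PySem.Int.floordiv (total_outlength * minlength) total_minlength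

def scaleOneSizesOffsets (minlengths : List Int) (total_minlength : Int) (total_outlength : Int) : List Int × List Int :=
  let ls := minlengths.foldl
    (fun ls minlength => ls ++ [scaleOneSize minlength total_minlength total_outlength]) [0]
  -- list(accumulate(ls)), kept as the pair (accumulated list, running value)
  let offsets := (ls.foldl (fun (p : List Int × Int) x => (p.1 ++ [p.2 + x], p.2 + x)) ([], 0)).1
  let endpad := total_outlength - offsets.getLastD 0   -- offsets[-1]; ls (hence offsets) is nonempty
  let ls' := ls.dropLast ++ [ls.getLastD 0 + endpad]   -- ls[-1] += endpad
  let sizes := ls'.drop 1                              -- ls[1:]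
  let offsets' := offsets.dropLast                     -- offsets[:-1]
  (sizes, offsets')

-- ===== PORT B =====
-- Source B's scaleOneSize is textually identical to A's; the port shares the helper scaleOneSize above.
def scaleOneSizesOffsets_alt (minlengths : List Int) (total_minlength : Int) (total_outlength : Int) : List Int × List Int :=
  let sizes0 := minlengths.map (fun m => scaleOneSize m total_minlength total_outlength)
  -- 'if sizes: sizes[-1] = total_outlength - sum(sizes[:-1])'
  let sizes := if sizes0.isEmpty then sizes0
               else sizes0.dropLast ++ [total_outlength - sizes0.dropLast.sum]
  -- 'for s in reversed(sizes): running -= s; offsets.append(running)'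
  let st := sizes.reverse.foldl (fun (p : List Int × Int) s => (p.1 ++ [p.2 - s], p.2 - s))
              ([], total_outlength)
  (sizes, st.1.reverse)                                -- offsets.reverse()

-- ===== PRECONDITION & SPEC =====
-- Pre_ is exactly where Python A returns: the per-element assert chain holds and the endpad assert passes.
def Pre_scaleOneSizesOffsets (minlengths : List Int) (total_minlength : Int) (total_outlength : Int) : Prop :=
  (∀ m ∈ minlengths, 0 ≤ m ∧ m ≤ total_minlength ∧ total_minlength ≤ total_outlength) ∧
  (minlengths.map (fun m => if total_minlength = 0 then 0
      else PySem.Int.floordiv (total_outlength * m) total_minlength)).sum ≤ total_outlength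
instance (minlengths : List Int) (total_minlength : Int) (total_outlength : Int) : Decidable (Pre_scaleOneSizesOffsets minlengths total_minlength total_outlength) := by unfold Pre_scaleOneSizesOffsets; infer_instance

def pvWitness_scaleOneSizesOffsets : List Int × Int × Int := ([1, 2], 3, 6)

def Spec_scaleOneSizesOffsets (minlengths : List Int) (total_minlength : Int) (total_outlength : Int) (out : List Int × List Int) : Prop := out = scaleOneSizesOffsets_alt minlengths total_minlength total_outlength
instance (minlengths : List Int) (total_minlength : Int) (total_outlength : Int) (out : List Int × List Int) : Decidable (Spec_scaleOneSizesOffsets minlengths total_minlength total_outlength out) := by unfold Spec_scaleOneSizesOffsets; infer_instance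

-- ===== CLAIM (what is proved, stated in full; the proofs are below) =====
def Claim_equal_scaleOneSizesOffsets : Prop := ∀ (minlengths : List Int) (total_minlength : Int) (total_outlength : Int), Dom_scaleOneSizesOffsets minlengths total_minlength total_outlength → Pre_scaleOneSizesOffsets minlengths total_minlength total_outlength → Spec_scaleOneSizesOffsets minlengths total_minlength total_outlength (scaleOneSizesOffsets minlengths total_minlength total_outlength)

-- ===== LEMMAS AND PROOFS =====

-- prefix sums of xs starting from running value r (the value pushed by accumulate step r+x)
def pvAcc (r : Int) : List Int → List Int
  | [] => []
  | x :: xs => (r + x) :: pvAcc (r + x) xs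

-- running value of B's backward loop BEFORE appending: pushes r-x then recurses
def pvBack (r : Int) : List Int → List Int
  | [] => []
  | x :: xs => (r - x) :: pvBack (r - x) xs

-- offsets: running value before each element (prefix sums with a leading r)
def pvOff (r : Int) : List Int → List Int
  | [] => []
  | x :: xs => r :: pvOff (r + x) xs

lemma foldA_eq (f : Int → Int) : ∀ (ms : List Int) (init : List Int),
    ms.foldl (fun ls m => ls ++ [f m]) init = init ++ ms.map f := by
  intro ms
  induction ms with
  | nil => simp
  | cons m ms ih => intro init; simp [List.foldl, ih]

lemma foldAcc_eq : ∀ (xs : List Int) (acc : List Int) (r : Int),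
    xs.foldl (fun (p : List Int × Int) x => (p.1 ++ [p.2 + x], p.2 + x)) (acc, r)
      = (acc ++ pvAcc r xs, r + xs.sum) := by
  intro xs
  induction xs with
  | nil => simp [pvAcc]
  | cons x xs ih =>
    intro acc r
    simp only [List.foldl, ih, pvAcc, List.sum_cons, Prod.mk.injEq]
    exact ⟨by simp, by ring⟩

lemma foldBack_eq : ∀ (xs : List Int) (acc : List Int) (r : Int),
    xs.foldl (fun (p : List Int × Int) x => (p.1 ++ [p.2 - x], p.2 - x)) (acc, r)
      = (acc ++ pvBack r xs, r - xs.sum) := by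
  intro xs
  induction xs with
  | nil => simp [pvBack]
  | cons x xs ih =>
    intro acc r
    simp only [List.foldl, ih, pvBack, List.sum_cons, Prod.mk.injEq]
    exact ⟨by simp, by ring⟩

lemma acc_getLastD : ∀ (xs : List Int) (r : Int),
    (pvAcc r xs).getLastD r = r + xs.sum := by
  intro xs
  induction xs with
  | nil => simp [pvAcc]
  | cons x xs ih =>
    intro r
    simp only [pvAcc, List.getLastD_cons, ih, List.sum_cons]
    ring

lemma acc_dropLast : ∀ (xs : List Int) (r : Int),
    (r :: pvAcc r xs).dropLast = pvOff r xs := by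
  intro xs
  induction xs with
  | nil => simp [pvAcc, pvOff]
  | cons x xs ih =>
    intro r
    simp only [pvAcc, pvOff, List.dropLast_cons₂, ih]

lemma off_concat : ∀ (D : List Int) (r x : Int),
    pvOff r (D ++ [x]) = pvOff r D ++ [r + D.sum] := by
  intro D
  induction D with
  | nil => simp [pvOff]
  | cons d D ih =>
    intro r x
    simp [pvOff, ih, add_assoc]

lemma back_rev : ∀ (E : List Int) (r : Int),
    pvBack (r + E.sum) E = (pvOff r E.reverse).reverse := by
  intro E
  induction E with
  | nil => simp [pvBack, pvOff]
  | cons x E ih =>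
    intro r
    have h1 : r + (x :: E).sum - x = r + E.sum := by simp [List.sum_cons]; ring
    simp only [pvBack, h1, ih, List.reverse_cons, off_concat, List.reverse_append,
      List.reverse_cons, List.reverse_nil, List.nil_append, List.sum_reverse,
      List.singleton_append]

-- normal form shared by both ports
lemma a_normal (ms : List Int) (tm tout : Int) :
    scaleOneSizesOffsets ms tm tout =
      (if (ms.map (fun m => scaleOneSize m tm tout)) = [] then ([], [])
       else ((ms.map (fun m => scaleOneSize m tm tout)).dropLast ++
              [(ms.map (fun m => scaleOneSize m tm tout)).getLastD 0 +
                (tout - (ms.map (fun m => scaleOneSize m tm tout)).sum)],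
             pvOff 0 (ms.map (fun m => scaleOneSize m tm tout)))) := by
  set L := ms.map (fun m => scaleOneSize m tm tout) with hL
  have hfold := foldA_eq (fun m => scaleOneSize m tm tout) ms [0]
  have hacc := foldAcc_eq (0 :: L) [] 0
  have hacc1 : pvAcc 0 (0 :: L) = 0 :: pvAcc 0 L := by simp [pvAcc]
  rw [hacc1] at hacc
  simp only [scaleOneSizesOffsets, ← hL, hfold, List.singleton_append, hacc,
    List.nil_append]
  cases L with
  | nil => simp [pvAcc]
  | cons s ss =>
    have hlast : (pvAcc 0 (s :: ss)).getLastD 0 = s + ss.sum := by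
      have := acc_getLastD (s :: ss) 0
      simpa using this
    have hdrop : (0 :: pvAcc 0 (s :: ss)).dropLast = pvOff 0 (s :: ss) :=
      acc_dropLast (s :: ss) 0
    simp only [List.getLastD_cons, hlast, List.dropLast_cons₂, hdrop]
    simp

lemma b_normal (ms : List Int) (tm tout : Int) :
    scaleOneSizesOffsets_alt ms tm tout =
      (if (ms.map (fun m => scaleOneSize m tm tout)) = [] then ([], [])
       else ((ms.map (fun m => scaleOneSize m tm tout)).dropLast ++
              [(ms.map (fun m => scaleOneSize m tm tout)).getLastD 0 +
                (tout - (ms.map (fun m => scaleOneSize m tm tout)).sum)],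
             pvOff 0 (ms.map (fun m => scaleOneSize m tm tout)))) := by
  set L := ms.map (fun m => scaleOneSize m tm tout) with hL
  simp only [scaleOneSizesOffsets_alt, ← hL]
  cases hc : L with
  | nil => simp
  | cons s ss =>
    set D := (s :: ss).dropLast with hD
    have hne : (s :: ss) ≠ [] := by simp
    have hsplit : D ++ [(s :: ss).getLast hne] = s :: ss := List.dropLast_concat_getLast hne
    have hlast : (s :: ss).getLastD 0 = (s :: ss).getLast hne := by
      simp [List.getLastD_eq_getLast?, List.getLast?_eq_some_getLast hne]
    have hsum : (s :: ss).sum = D.sum + (s :: ss).getLast hne := by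
      conv_lhs => rw [← hsplit]
      simp
    have hadj : (s :: ss).getLastD 0 + (tout - (s :: ss).sum) = tout - D.sum := by
      rw [hlast, hsum]; ring
    have hrev : (D ++ [tout - D.sum]).reverse = (tout - D.sum) :: D.reverse := by simp
    have hback : pvBack tout ((tout - D.sum) :: D.reverse)
        = D.sum :: (pvOff 0 D).reverse := by
      have h1 : tout - (tout - D.sum) = 0 + D.reverse.sum := by simp [List.sum_reverse]
      have h2 := back_rev D.reverse 0
      simp only [pvBack, h1, h2, List.reverse_reverse]
      simp [List.sum_reverse]
    have hoff : (D.sum :: (pvOff 0 D).reverse).reverse = pvOff 0 (s :: ss) := by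
      conv_rhs => rw [← hsplit]
      rw [off_concat]
      simp
    simp only [List.isEmpty_cons, Bool.false_eq_true, if_false,      foldBack_eq, List.nil_append, hrev, hback, hoff, hadj, if_neg hne]

-- ===== VERDICT (by name: the statement is the Claim_ definition above) =====
theorem scaleOneSizesOffsets_spec : Claim_equal_scaleOneSizesOffsets := by
  intro ms tm tout _ _
  unfold Spec_scaleOneSizesOffsets
  rw [a_normal, b_normal]
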